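-- pv_equiv track=rewrite | github.com/kh277/BOJ | 백준/Bronze/27890. 특별한 작은 분수/특별한 작은 분수.py | solve
-- ===== SOURCE A (Python) =====
-- def solve(x0, N):
--     xt = x0
--     for _ in range(N):
--         if xt % 2 == 0:
--             xt = xt//2 ^ 6
--         else:
--             xt = (2*xt)^6
--
--     return xt
-- ===== SOURCE B (Python) =====
-- def solve(x0, N):
--     def step(x):
--         return (x // 2) ^ 6 if x % 2 == 0 else (2 * x) ^ 6
--     seen = {}
--     xt = x0
--     i = 0
--     while i < N:
--         if xt in seen:
--             p = i - seen[xt]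
--             for _ in range((N - i) % p):
--                 xt = step(xt)
--             return xt
--         seen[xt] = i
--         xt = step(xt)
--         i += 1
--     return xt
-- ===== Notes on version B (the rewrite author's own statement) =====
-- stated objective: faster
-- what changed: B detects the first repeated value of the transform with a seen-dict and jumps ahead using (N-i) mod cycle-length instead of iterating all N steps.
import Mathlib
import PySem

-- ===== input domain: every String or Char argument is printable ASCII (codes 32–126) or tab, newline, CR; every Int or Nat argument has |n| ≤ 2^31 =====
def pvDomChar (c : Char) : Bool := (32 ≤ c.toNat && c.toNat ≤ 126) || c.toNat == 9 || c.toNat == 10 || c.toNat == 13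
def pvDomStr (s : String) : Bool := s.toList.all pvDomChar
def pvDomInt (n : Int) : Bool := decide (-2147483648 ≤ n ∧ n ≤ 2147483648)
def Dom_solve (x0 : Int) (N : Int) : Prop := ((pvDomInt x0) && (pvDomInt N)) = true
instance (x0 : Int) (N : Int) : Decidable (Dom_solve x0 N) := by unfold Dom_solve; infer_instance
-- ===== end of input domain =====

-- B replaces A's N-step iteration by cycle detection (record first index of each value, jump ahead
-- with (N - i) mod cycle-length); same return value.

-- ===== PORT A =====
-- literal port of A: repeat the transform once per element of range(N)
def solve (x0 : Int) (N : Int) : Int :=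
  (PySem.List.pyRange 0 N 1).foldl
    (fun xt _ =>
      if PySem.Int.mod xt 2 = 0 then PySem.Int.bxor (PySem.Int.floordiv xt 2) 6
      else PySem.Int.bxor (2 * xt) 6) x0

-- ===== PORT B =====
-- Source B's helper step(x)
def stepB (x : Int) : Int :=
  if PySem.Int.mod x 2 = 0 then PySem.Int.bxor (PySem.Int.floordiv x 2) 6
  else PySem.Int.bxor (2 * x) 6

-- Source B's final 'for _ in range(r)' loop
def iterB : Nat → Int → Int
  | 0, x => x
  | k + 1, x => iterB k (stepB x)

-- Source B's 'while i < N' loop; fuel = number of remaining iterations (N - i)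
def loopB (N : Int) : Nat → Int → Int → PySem.Dict Int Int → Int
  | 0, _, xt, _ => xt
  | k + 1, i, xt, seen =>
    match seen.get? xt with
    | some j => iterB (PySem.Int.mod (N - i) (i - j)).toNat xt
    | none => loopB N k (i + 1) (stepB xt) (seen.insert xt i)

def solve_alt (x0 : Int) (N : Int) : Int :=
  loopB N N.toNat 0 x0 PySem.Dict.empty

-- ===== PRECONDITION & SPEC =====
def Spec_solve (x0 : Int) (N : Int) (out : Int) : Prop := out = solve_alt x0 N
instance (x0 : Int) (N : Int) (out : Int) : Decidable (Spec_solve x0 N out) := by unfold Spec_solve; infer_instance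

-- ===== CLAIM (what is proved, stated in full; the proofs are below) =====
def Claim_equal_solve : Prop := ∀ (x0 : Int) (N : Int), Dom_solve x0 N → Spec_solve x0 N (solve x0 N)

-- ===== LEMMAS AND PROOFS =====

theorem iterB_succ_right (k : Nat) (x : Int) : iterB (k + 1) x = stepB (iterB k x) := by
  induction k generalizing x with
  | zero => rfl
  | succ n ih => show iterB (n + 1) (stepB x) = _; rw [ih]; rfl

theorem iterB_add (a b : Nat) (x : Int) : iterB (a + b) x = iterB b (iterB a x) := by
  induction a generalizing x with
  | zero => rw [Nat.zero_add]; rfl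
  | succ n ih =>
    rw [show n + 1 + b = (n + b) + 1 from by omega]
    show iterB (n + b) (stepB x) = iterB b (iterB (n + 1) x)
    rw [ih (stepB x)]; rfl

-- A's fold over range(N) is iterB
theorem foldl_eq_iterB (l : List Int) (x : Int) :
    l.foldl (fun xt _ => stepB xt) x = iterB l.length x := by
  induction l generalizing x with
  | nil => rfl
  | cons h t ih => simp [List.foldl, ih]; rfl

theorem solve_eq_iterB (x0 N : Int) : solve x0 N = iterB N.toNat x0 := by
  have : solve x0 N = (PySem.List.pyRange 0 N 1).foldl (fun xt _ => stepB xt) x0 := rfl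
  rw [this, foldl_eq_iterB, PySem.List.length_pyRange_one]
  norm_num

-- one period shifts away
theorem period_shift (x0 : Int) (a p s : Nat) (hp : iterB (a + p) x0 = iterB a x0) :
    iterB (a + p + s) x0 = iterB (a + s) x0 := by
  rw [iterB_add (a + p) s, hp, ← iterB_add]

-- q periods shift away
theorem period_mul (x0 : Int) (a p : Nat) (hp : iterB (a + p) x0 = iterB a x0) :
    ∀ (q s : Nat), iterB (a + p * q + s) x0 = iterB (a + s) x0 := by
  intro q
  induction q with
  | zero => simp
  | succ n ih =>
    intro s
    have h1 : a + p * (n + 1) + s = a + p * n + (p + s) := by ring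
    rw [h1, ih (p + s), show a + (p + s) = a + p + s from by ring, period_shift x0 a p s hp]

-- the loop invariant: if xt is the i-th iterate and seen records earlier iterates,
-- loopB returns the N-th iterate
theorem loopB_eq (x0 N : Int) : ∀ (k : Nat) (i : Int) (seen : PySem.Dict Int Int),
    0 ≤ i → i + k = N →
    (∀ v j, seen.get? v = some j → 0 ≤ j ∧ j < i ∧ iterB j.toNat x0 = v) →
    loopB N k i (iterB i.toNat x0) seen = iterB N.toNat x0 := by
  intro k
  induction k with
  | zero =>
    intro i seen hi hiN _
    have : i = N := by omega
    subst this
    rfl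
  | succ n ih =>
    intro i seen hi hiN hseen
    show loopB N (n + 1) i (iterB i.toNat x0) seen = iterB N.toNat x0
    rw [loopB]
    cases hg : seen.get? (iterB i.toNat x0) with
    | none =>
      have hstep : stepB (iterB i.toNat x0) = iterB (i + 1).toNat x0 := by
        have : (i + 1).toNat = i.toNat + 1 := by omega
        rw [this, iterB_succ_right]
      rw [hstep]
      apply ih (i + 1) (seen.insert (iterB i.toNat x0) i) (by omega) (by omega)
      intro v j hvj
      rw [PySem.Dict.get?_insert] at hvj
      by_cases hv : v = iterB i.toNat x0
      · simp [hv] at hvj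
        subst hvj
        exact ⟨hi, by omega, hv.symm⟩
      · simp [hv] at hvj
        obtain ⟨h1, h2, h3⟩ := hseen v j hvj
        exact ⟨h1, by omega, h3⟩
    | some j =>
      obtain ⟨hj0, hji, hjv⟩ := hseen _ _ hg
      set p : Int := i - j with hp
      have hppos : 0 < p := by omega
      have hNi : 0 ≤ N - i := by omega
      have hmod : PySem.Int.mod (N - i) p = (N - i) % p :=
        PySem.Int.mod_eq_emod_of_pos hppos
      set a : Nat := j.toNat with ha
      set P : Nat := p.toNat with hP
      have hPpos : 0 < P := by omega
      have hia : i.toNat = a + P := by omega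
      have hper : iterB (a + P) x0 = iterB a x0 := by rw [← hia, hjv]
      have hNge : i.toNat ≤ N.toNat := by omega
      set m : Nat := N.toNat with hm
      set r : Nat := (PySem.Int.mod (N - i) p).toNat with hr
      have hrval : r = (m - i.toNat) % P := by
        rw [hr, hmod, Int.toNat_emod hNi (le_of_lt hppos)]
        congr 1
        omega
      -- goal: iterB r (iterB i.toNat x0) = iterB m x0
      show iterB (PySem.Int.mod (N - i) (i - j)).toNat (iterB i.toNat x0) = iterB m x0
      rw [show (PySem.Int.mod (N - i) (i - j)).toNat = r from by rw [hr, hp], ← iterB_add]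
      have hsame : (m - a) % P = (m - i.toNat) % P := by
        rw [show m - a = (m - i.toNat) + P from by omega, Nat.add_mod_right]
      have hdm : m = a + P * ((m - a) / P) + (m - a) % P := by
        have := Nat.div_add_mod (m - a) P
        omega
      have hR : iterB m x0 = iterB (a + r) x0 := by
        conv_lhs => rw [hdm, hsame, ← hrval]
        exact period_mul x0 a P hper ((m - a) / P) r
      have hL : iterB (i.toNat + r) x0 = iterB (a + r) x0 := by
        rw [show i.toNat + r = a + P * 1 + r from by omega]
        exact period_mul x0 a P hper 1 r
      rw [hL, hR]

-- ===== VERDICT (by name: the statement is the Claim_ definition above) =====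
theorem solve_spec : Claim_equal_solve := by
  intro x0 N _
  show solve x0 N = solve_alt x0 N
  rw [solve_eq_iterB]
  unfold solve_alt
  by_cases hN : 0 ≤ N
  · have := loopB_eq x0 N N.toNat 0 PySem.Dict.empty le_rfl (by omega)
      (by intro v j h; rw [PySem.Dict.get?_empty] at h; exact absurd h (by simp))
    simpa using this.symm
  · have : N.toNat = 0 := by omega
    rw [this]
    rfl
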